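-- pv_equiv track=rewrite | github.com/haeseul/MakeMyBrainFatter | practice/fib_faster.py | fibonacci_last_three_digits
-- ===== SOURCE A (Python) =====
-- def fibonacci_last_three_digits(n):
--     if n == 0:
--         return 0
--     elif n == 1:
--         return 1
--
--     a, b = 0, 1
--     for _ in range(2, n + 1):
--         a, b = b, (a + b) % 1000
--
--     return b
-- ===== SOURCE B (Python) =====
-- def fibonacci_last_three_digits(n):
--     # Pisano: F(n) mod 1000 depends only on n mod 1500; compute F(k) mod 1000
--     # by the fast-doubling recursion on the bits of k.
--     def fd(k):
--         # returns (F(k) mod 1000, F(k+1) mod 1000)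
--         if k == 0:
--             return (0, 1)
--         a, b = fd(k >> 1)
--         c = (a * (2 * b - a)) % 1000
--         d = (a * a + b * b) % 1000
--         if k & 1:
--             return (d, (c + d) % 1000)
--         return (c, d)
--     return fd(n % 1500)[0]
-- ===== Notes on version B (the rewrite author's own statement) =====
-- stated objective: faster
-- what changed: B reduces n modulo the Pisano period 1500 of modulus 1000 and then computes F(k) mod 1000 by fast-doubling recursion on the bits of k, instead of A's linear loop over all indices.
-- outside the precondition, e.g. on fibonacci_last_three_digits(-5): A returns 1, B returns 5
import Mathlib
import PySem

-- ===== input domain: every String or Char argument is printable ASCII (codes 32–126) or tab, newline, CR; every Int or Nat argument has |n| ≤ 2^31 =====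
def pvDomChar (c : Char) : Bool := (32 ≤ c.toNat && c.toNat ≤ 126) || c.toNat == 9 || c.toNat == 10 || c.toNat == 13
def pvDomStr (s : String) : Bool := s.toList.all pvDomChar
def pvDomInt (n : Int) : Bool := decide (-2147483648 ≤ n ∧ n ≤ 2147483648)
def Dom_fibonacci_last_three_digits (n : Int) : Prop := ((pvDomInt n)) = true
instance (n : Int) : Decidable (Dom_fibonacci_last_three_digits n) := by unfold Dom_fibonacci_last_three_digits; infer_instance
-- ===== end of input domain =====

-- B reduces n mod the Pisano period 1500 and computes F(k) mod 1000 by fast doubling: faster.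

-- ===== PORT A =====
def fibonacci_last_three_digits (n : Int) : Int :=
  if n = 0 then 0
  else if n = 1 then 1
  else
    ((PySem.List.pyRange 2 (n + 1) 1).foldl
      (fun (p : Int × Int) _ => (p.2, PySem.Int.mod (p.1 + p.2) 1000)) (0, 1)).2

-- ===== PORT B =====
-- fd(k): (F(k) mod 1000, F(k+1) mod 1000) by fast doubling; k = n % 1500 is
-- nonnegative in Python, so a Nat argument is exact (k >> 1 = k / 2, k & 1 = k % 2).
def pvFd (k : Nat) : Int × Int :=
  if _h : k = 0 then (0, 1)
  else
    let p := pvFd (k / 2)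
    let c := PySem.Int.mod (p.1 * (2 * p.2 - p.1)) 1000
    let d := PySem.Int.mod (p.1 * p.1 + p.2 * p.2) 1000
    if k % 2 = 1 then (d, PySem.Int.mod (c + d) 1000) else (c, d)
termination_by k
decreasing_by omega

def fibonacci_last_three_digits_alt (n : Int) : Int :=
  (pvFd (PySem.Int.mod n 1500).toNat).1

-- ===== PRECONDITION & SPEC =====
-- Pre_ excludes negative n: "the nth Fibonacci number" is unspecified there, and A's value
-- (its loop never runs, it returns 1) and B's periodic value are both defensible accidents.
def Pre_fibonacci_last_three_digits (n : Int) : Prop := 0 ≤ n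
instance (n : Int) : Decidable (Pre_fibonacci_last_three_digits n) := by unfold Pre_fibonacci_last_three_digits; infer_instance
def pvWitness_fibonacci_last_three_digits : Int := 10

def Spec_fibonacci_last_three_digits (n : Int) (out : Int) : Prop := out = fibonacci_last_three_digits_alt n
instance (n : Int) (out : Int) : Decidable (Spec_fibonacci_last_three_digits n out) := by unfold Spec_fibonacci_last_three_digits; infer_instance

-- ===== CLAIM (what is proved, stated in full; the proofs are below) =====
def Claim_equal_fibonacci_last_three_digits : Prop := ∀ (n : Int), Dom_fibonacci_last_three_digits n → Pre_fibonacci_last_three_digits n → Spec_fibonacci_last_three_digits n (fibonacci_last_three_digits n)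

-- ===== LEMMAS AND PROOFS =====

-- A's loop body, as a function of the pair state
def pvStep (p : Int × Int) : Int × Int := (p.2, PySem.Int.mod (p.1 + p.2) 1000)

theorem pvFoldl_eq_iterate (l : List Int) (x : Int × Int) :
    l.foldl (fun (p : Int × Int) _ => (p.2, PySem.Int.mod (p.1 + p.2) 1000)) x = pvStep^[l.length] x := by
  induction l generalizing x with
  | nil => rfl
  | cons h t ih => rw [List.foldl_cons, ih, List.length_cons, Function.iterate_succ_apply]; rfl

theorem pvMod1000 (x : Int) : PySem.Int.mod x 1000 = x % 1000 :=
  PySem.Int.mod_eq_emod_of_pos (by norm_num)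

-- A's iterated step computes the Fibonacci pair mod 1000
theorem pvIter_fib (k : Nat) :
    pvStep^[k] (0, 1) = (((Nat.fib k % 1000 : Nat) : Int), ((Nat.fib (k + 1) % 1000 : Nat) : Int)) := by
  induction k with
  | zero => decide
  | succ k ih =>
      rw [Function.iterate_succ_apply', ih]
      unfold pvStep
      have hfib : Nat.fib (k + 1 + 1) = Nat.fib k + Nat.fib (k + 1) := Nat.fib_add_two
      refine Prod.ext rfl ?_
      simp only [pvMod1000]
      push_cast
      omega

set_option maxRecDepth 20000 in
theorem pvStep_period : pvStep^[1500] (0, 1) = (0, 1) := by decide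

theorem pvIterate_mod (q a : ℕ) : pvStep^[a + 1500 * q] (0, 1) = pvStep^[a] (0, 1) := by
  induction q with
  | zero => rfl
  | succ q ih =>
      have : a + 1500 * (q + 1) = (a + 1500 * q) + 1500 := by ring
      rw [this, Function.iterate_add_apply, pvStep_period, ih]

theorem pvIterate_reduce (m : ℕ) : pvStep^[m] (0, 1) = pvStep^[m % 1500] (0, 1) := by
  conv_lhs => rw [show m = m % 1500 + 1500 * (m / 1500) from by omega]
  exact pvIterate_mod _ _

-- fast doubling computes the same Fibonacci pair mod 1000
theorem pvFd_fib (k : Nat) :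
    pvFd k = (((Nat.fib k % 1000 : Nat) : Int), ((Nat.fib (k + 1) % 1000 : Nat) : Int)) := by
  induction k using Nat.strong_induction_on with
  | _ k ih =>
    rw [pvFd]
    by_cases h0 : k = 0
    · subst h0; simp
    · rw [dif_neg h0, ih (k / 2) (by omega)]
      set m := k / 2 with hm
      set x : Int := (Nat.fib m : Int) with hx
      set y : Int := (Nat.fib (m + 1) : Int) with hy
      have hxm : ((x % 1000) * (2 * (y % 1000) - (x % 1000))) % 1000
          = (x * (2 * y - x)) % 1000 :=
        (Int.ModEq.mul (Int.emod_emod_of_dvd x dvd_rfl)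
          (Int.ModEq.sub (Int.ModEq.mul_left 2 (Int.emod_emod_of_dvd y dvd_rfl))
            (Int.emod_emod_of_dvd x dvd_rfl)))
      have hym : ((x % 1000) * (x % 1000) + (y % 1000) * (y % 1000)) % 1000
          = (x * x + y * y) % 1000 :=
        (Int.ModEq.add (Int.ModEq.mul (Int.emod_emod_of_dvd x dvd_rfl) (Int.emod_emod_of_dvd x dvd_rfl))
          (Int.ModEq.mul (Int.emod_emod_of_dvd y dvd_rfl) (Int.emod_emod_of_dvd y dvd_rfl)))
      have hle : Nat.fib m ≤ 2 * Nat.fib (m + 1) :=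
        le_trans (Nat.fib_le_fib_succ) (by omega)
      have h2m : (Nat.fib (2 * m) : Int) = x * (2 * y - x) := by
        rw [Nat.fib_two_mul, hx, hy]; push_cast [hle]; ring
      have h2m1 : (Nat.fib (2 * m + 1) : Int) = x * x + y * y := by
        rw [Nat.fib_two_mul_add_one, hx, hy]; push_cast; ring
      have hc : PySem.Int.mod (((Nat.fib m % 1000 : Nat) : Int) * (2 * ((Nat.fib (m + 1) % 1000 : Nat) : Int) - ((Nat.fib m % 1000 : Nat) : Int))) 1000
          = ((Nat.fib (2 * m) % 1000 : Nat) : Int) := by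
        rw [pvMod1000, Int.natCast_mod, Int.natCast_mod, Int.natCast_mod, ← hx, ← hy]
        push_cast
        rw [hxm, ← h2m]
      have hd : PySem.Int.mod (((Nat.fib m % 1000 : Nat) : Int) * ((Nat.fib m % 1000 : Nat) : Int) + ((Nat.fib (m + 1) % 1000 : Nat) : Int) * ((Nat.fib (m + 1) % 1000 : Nat) : Int)) 1000
          = ((Nat.fib (2 * m + 1) % 1000 : Nat) : Int) := by
        rw [pvMod1000, Int.natCast_mod, Int.natCast_mod, Int.natCast_mod, ← hx, ← hy]
        push_cast
        rw [hym, ← h2m1]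
      simp only [hc, hd]
      by_cases hp : k % 2 = 1
      · rw [if_pos hp]
        have hk : k = 2 * m + 1 := by omega
        have hfib : Nat.fib (2 * m + 2) = Nat.fib (2 * m) + Nat.fib (2 * m + 1) := Nat.fib_add_two
        refine Prod.ext ?_ ?_
        · simp [hk]
        · show PySem.Int.mod _ 1000 = _
          rw [pvMod1000]
          have : k + 1 = 2 * m + 2 := by omega
          rw [this]
          push_cast
          omega
      · rw [if_neg hp]
        have hk : k = 2 * m := by omega
        refine Prod.ext ?_ ?_ <;> simp [hk]

-- Fibonacci mod 1000 has period 1500 (from the iterate lemmas)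
theorem pvFib_period (m : Nat) : Nat.fib (m % 1500) % 1000 = Nat.fib m % 1000 := by
  have h := pvIterate_reduce m
  rw [pvIter_fib, pvIter_fib] at h
  have h1 : ((Nat.fib m % 1000 : Nat) : Int) = ((Nat.fib (m % 1500) % 1000 : Nat) : Int) :=
    congrArg Prod.fst h
  exact_mod_cast h1.symm

-- ===== VERDICT (by name: the statement is the Claim_ definition above) =====
theorem fibonacci_last_three_digits_spec : Claim_equal_fibonacci_last_three_digits := by
  intro n _ hn
  have hn' : (0 : Int) ≤ n := hn
  unfold Spec_fibonacci_last_three_digits fibonacci_last_three_digits fibonacci_last_three_digits_alt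
  have hmod : PySem.Int.mod n 1500 = n % 1500 := PySem.Int.mod_eq_emod_of_pos (by norm_num)
  have htn : (n % 1500).toNat = n.toNat % 1500 := by omega
  rw [hmod, htn, pvFd_fib, pvFib_period]
  by_cases h0 : n = 0
  · subst h0; decide
  · by_cases h1 : n = 1
    · subst h1; decide
    · rw [if_neg h0, if_neg h1, pvFoldl_eq_iterate, PySem.List.length_pyRange_one]
      have hA : (n + 1 - 2).toNat = n.toNat - 1 := by omega
      rw [hA]
      obtain ⟨j, hj⟩ : ∃ j, n.toNat = j + 1 := ⟨n.toNat - 1, by omega⟩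
      rw [hj, Nat.add_sub_cancel, pvIter_fib]
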